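-- pv_equiv track=rewrite | github.com/ermantatar/Algorithms | Python/Utility/amazon.py | get_k_nodes
-- ===== SOURCE A (Python) =====
-- def get_k_nodes(booting_power,processing_power,max_power):
-- 	if len(booting_power) != len(processing_power) or len(booting_power) == 0 or len(processing_power) == 0:
-- 		return 0
-- 	if len(booting_power) == 1 and len(processing_power) == 1 and booting_power[0] + processing_power[0] <= max_power:
-- 		return 1
-- 	min_k = 1
-- 	max_k = len(booting_power)
-- 	max_power_k = 0
-- 	for k in range(min_k, max_k+1):
-- 		i = 0
-- 		while i <= max_k-k:
-- 			power_k = (sum(processing_power[i:i+k]) * k) + max(booting_power[i:i+k])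
-- 			if power_k <= max_power:
-- 				max_power_k = max(k, max_power_k)
-- 			i += 1
-- 	return max_power_k
-- ===== SOURCE B (Python) =====
-- def get_k_nodes(booting_power, processing_power, max_power):
--     n = len(booting_power)
--     if n == 0 or n != len(processing_power):
--         return 0
--     best = 0
--     for i in range(n):
--         s = 0
--         m = booting_power[i]
--         for j in range(i, n):
--             s += processing_power[j]
--             if booting_power[j] > m:
--                 m = booting_power[j]
--             k = j - i + 1
--             if s * k + m <= max_power and k > best:
--                 best = k
--     return best
-- ===== Notes on version B (the rewrite author's own statement) =====
-- stated objective: faster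
-- what changed: A recomputes sum() and max() from scratch for every (k, start) window, O(n^3); B fixes the window start and extends it rightward while maintaining a running sum and running max, deciding each window in O(1), O(n^2).
import Mathlib
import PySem

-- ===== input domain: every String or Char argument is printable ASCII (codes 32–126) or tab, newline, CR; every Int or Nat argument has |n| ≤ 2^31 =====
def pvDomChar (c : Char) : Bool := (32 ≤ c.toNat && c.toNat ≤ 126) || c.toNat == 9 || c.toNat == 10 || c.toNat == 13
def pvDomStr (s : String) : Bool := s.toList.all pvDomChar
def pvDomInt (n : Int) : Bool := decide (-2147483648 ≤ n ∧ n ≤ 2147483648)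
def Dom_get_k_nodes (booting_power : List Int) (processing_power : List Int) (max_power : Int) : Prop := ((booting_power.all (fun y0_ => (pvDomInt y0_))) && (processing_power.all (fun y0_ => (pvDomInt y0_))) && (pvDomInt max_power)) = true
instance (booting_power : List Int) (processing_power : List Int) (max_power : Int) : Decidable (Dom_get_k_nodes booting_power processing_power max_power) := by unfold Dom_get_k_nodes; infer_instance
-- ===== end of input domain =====

-- B replaces A's per-window sum()/max() recomputation (O(n^3)) by a running sum and running max
-- while extending each window start rightward (O(n^2)); objective: faster.

-- ===== PORT A =====
-- the 'while i <= max_k - k: …; i += 1' loop with i starting at 0 is exactly 'for i in range(0, max_k - k + 1)';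
-- the window slices are nonempty (k ≥ 1, i + k ≤ n), so Python's max() never raises and '.getD 0' never fires
def get_k_nodes (booting_power : List Int) (processing_power : List Int) (max_power : Int) : Int :=
  if booting_power.length ≠ processing_power.length ∨ booting_power.length = 0 ∨ processing_power.length = 0 then
    0
  else if booting_power.length = 1 ∧ processing_power.length = 1 ∧
      PySem.List.pyGetD booting_power 0 0 + PySem.List.pyGetD processing_power 0 0 ≤ max_power then
    1
  else
    let max_k : Int := booting_power.length
    (PySem.List.pyRange 1 (max_k + 1) 1).foldl (fun max_power_k k =>
      (PySem.List.pyRange 0 (max_k - k + 1) 1).foldl (fun max_power_k i =>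
        let power_k := (PySem.List.slice processing_power (some i) (some (i + k))).sum * k +
          ((PySem.List.max? (PySem.List.slice booting_power (some i) (some (i + k))) (fun y => y)).getD 0)
        if power_k ≤ max_power then max k max_power_k else max_power_k) max_power_k) 0

-- ===== PORT B =====
def get_k_nodes_alt (booting_power : List Int) (processing_power : List Int) (max_power : Int) : Int :=
  let n := booting_power.length
  if n = 0 ∨ n ≠ processing_power.length then 0
  else
    (PySem.List.pyRange 0 (n : Int) 1).foldl (fun best i =>
      ((PySem.List.pyRange i (n : Int) 1).foldl (fun (st : Int × Int × Int) j =>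
        let s := st.1 + PySem.List.pyGetD processing_power j 0
        let m := if PySem.List.pyGetD booting_power j 0 > st.2.1 then PySem.List.pyGetD booting_power j 0 else st.2.1
        let k := j - i + 1
        let best' := if s * k + m ≤ max_power ∧ k > st.2.2 then k else st.2.2
        (s, m, best'))
        (0, PySem.List.pyGetD booting_power i 0, best)).2.2) 0

-- ===== PRECONDITION & SPEC =====
def Spec_get_k_nodes (booting_power : List Int) (processing_power : List Int) (max_power : Int) (out : Int) : Prop := out = get_k_nodes_alt booting_power processing_power max_power
instance (booting_power : List Int) (processing_power : List Int) (max_power : Int) (out : Int) : Decidable (Spec_get_k_nodes booting_power processing_power max_power out) := by unfold Spec_get_k_nodes; infer_instance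

-- ===== CLAIM (what is proved, stated in full; the proofs are below) =====
def Claim_equal_get_k_nodes : Prop := ∀ (booting_power : List Int) (processing_power : List Int) (max_power : Int), Dom_get_k_nodes booting_power processing_power max_power → Spec_get_k_nodes booting_power processing_power max_power (get_k_nodes booting_power processing_power max_power)

-- ===== LEMMAS AND PROOFS =====

-- sum of the window pp[i:i+k]
def pvWsum (pp : List Int) (i k : Nat) : Int := ((pp.drop i).take k).sum
-- running max over the window bp[i:i+k], seeded (as B does) with bp[i]
def pvWmax (bp : List Int) (i k : Nat) : Int := ((bp.drop i).take k).foldl max (bp.getD i 0)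
-- "window (i, k) fits the power budget"
def pvCond (bp pp : List Int) (mp : Int) (p : Nat × Nat) : Bool :=
  decide (pvWsum pp p.1 p.2 * (p.2 : Int) + pvWmax bp p.1 p.2 ≤ mp)
-- A's accumulator step and B's accumulator step, over a qualifying predicate c
def pvG (c : Nat × Nat → Bool) (a : Int) (p : Nat × Nat) : Int := if c p then max (p.2 : Int) a else a
def pvG' (c : Nat × Nat → Bool) (a : Int) (p : Nat × Nat) : Int := if c p ∧ (p.2 : Int) > a then (p.2 : Int) else a
-- the (start, size) pairs in A's traversal order and in B's traversal order
def pvPairsA (n : Nat) : List (Nat × Nat) := (List.range n).flatMap (fun k' => (List.range (n - k')).map (fun i => (i, k' + 1)))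
def pvPairsB (n : Nat) : List (Nat × Nat) := (List.range n).flatMap (fun i => (List.range (n - i)).map (fun d => (i, d + 1)))

theorem pvG'_eq_pvG (c : Nat × Nat → Bool) (a : Int) (p : Nat × Nat) : pvG' c a p = pvG c a p := by
  simp only [pvG, pvG', gt_iff_lt]
  by_cases hc : c p
  · simp only [hc, true_and, if_true]
    rcases le_or_gt ((p.2 : Int)) a with h | h
    · rw [if_neg (not_lt.mpr h), max_eq_right h]
    · rw [if_pos h, max_eq_left h.le]
  · simp [hc]

theorem pvG_le (c : Nat × Nat → Bool) (L : List (Nat × Nat)) (a : Int) : a ≤ L.foldl (pvG c) a := by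
  induction L generalizing a with
  | nil => simp
  | cons p L ih =>
    refine le_trans ?_ (ih (pvG c a p))
    simp only [pvG]; split_ifs <;> omega

theorem pvG_cases (c : Nat × Nat → Bool) (L : List (Nat × Nat)) :
    ∀ a, L.foldl (pvG c) a = a ∨ ∃ p ∈ L, c p ∧ L.foldl (pvG c) a = (p.2 : Int) := by
  induction L with
  | nil => intro a; simp
  | cons p L ih =>
    intro a
    rcases ih (pvG c a p) with h | ⟨q, hq, hcq, hval⟩
    · by_cases hc : c p
      · have hg : pvG c a p = max ((p.2 : Int)) a := by simp [pvG, hc]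
        rcases max_choice ((p.2 : Int)) a with hm | hm
        · exact Or.inr ⟨p, List.mem_cons_self, hc, by rw [List.foldl_cons, h, hg, hm]⟩
        · exact Or.inl (by rw [List.foldl_cons, h, hg, hm])
      · exact Or.inl (by rw [List.foldl_cons, h]; simp [pvG, hc])
    · exact Or.inr ⟨q, List.mem_cons_of_mem _ hq, hcq, by simpa using hval⟩

theorem pvG_ge (c : Nat × Nat → Bool) (L : List (Nat × Nat)) :
    ∀ a p, p ∈ L → c p = true → (p.2 : Int) ≤ L.foldl (pvG c) a := by
  induction L with
  | nil => intro a p h; simp at h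
  | cons q L ih =>
    intro a p hp hc
    rcases List.mem_cons.mp hp with rfl | hp'
    · refine le_trans ?_ (pvG_le c L (pvG c a p))
      simp [pvG, hc]
    · exact ih (pvG c a q) p hp' hc

theorem pvG_mono (c : Nat × Nat → Bool) (LA LB : List (Nat × Nat))
    (h : ∀ p, p ∈ LA → p ∈ LB) : LA.foldl (pvG c) 0 ≤ LB.foldl (pvG c) 0 := by
  rcases pvG_cases c LA 0 with h0 | ⟨p, hp, hc, hval⟩
  · rw [h0]; exact pvG_le c LB 0
  · rw [hval]; exact pvG_ge c LB 0 p (h p hp) hc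

theorem pvG_perm_eq (c : Nat × Nat → Bool) (LA LB : List (Nat × Nat))
    (h : ∀ p, p ∈ LA ↔ p ∈ LB) : LA.foldl (pvG c) 0 = LB.foldl (pvG c) 0 :=
  le_antisymm (pvG_mono c LA LB (fun p hp => (h p).mp hp))
    (pvG_mono c LB LA (fun p hp => (h p).mpr hp))

theorem mem_pvPairsA (n : Nat) (p : Nat × Nat) : p ∈ pvPairsA n ↔ 1 ≤ p.2 ∧ p.1 + p.2 ≤ n := by
  obtain ⟨i, k⟩ := p
  simp only [pvPairsA, List.mem_flatMap, List.mem_map, List.mem_range, Prod.mk.injEq]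
  constructor
  · rintro ⟨k', hk', i', hi', rfl, rfl⟩; omega
  · rintro ⟨h1, h2⟩; exact ⟨k - 1, by omega, i, by omega, rfl, by omega⟩

theorem mem_pvPairsB (n : Nat) (p : Nat × Nat) : p ∈ pvPairsB n ↔ 1 ≤ p.2 ∧ p.1 + p.2 ≤ n := by
  obtain ⟨i, k⟩ := p
  simp only [pvPairsB, List.mem_flatMap, List.mem_map, List.mem_range, Prod.mk.injEq]
  constructor
  · rintro ⟨i', hi', d, hd, rfl, rfl⟩; omega
  · rintro ⟨h1, h2⟩; exact ⟨i, by omega, k - 1, by omega, rfl, by omega⟩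

theorem pvWsum_succ (pp : List Int) (i t : Nat) (h : i + t < pp.length) :
    pvWsum pp i (t + 1) = pvWsum pp i t + pp.getD (i + t) 0 := by
  unfold pvWsum
  rw [List.take_add_one]
  have : (pp.drop i)[t]? = some pp[i + t] := by
    rw [List.getElem?_drop]
    exact List.getElem?_eq_getElem (by omega)
  simp [this, List.getD_eq_getElem?_getD, List.getElem?_eq_getElem (h := h)]

theorem pvWmax_succ (bp : List Int) (i t : Nat) (h : i + t < bp.length) :
    pvWmax bp i (t + 1) = max (pvWmax bp i t) (bp.getD (i + t) 0) := by
  unfold pvWmax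
  rw [List.take_add_one]
  have : (bp.drop i)[t]? = some bp[i + t] := by
    rw [List.getElem?_drop]
    exact List.getElem?_eq_getElem (by omega)
  simp [this, List.foldl_append, List.getD_eq_getElem?_getD, List.getElem?_eq_getElem (h := h)]

theorem pvMaxWin (bp : List Int) (i k : Nat) (hi : i < bp.length) :
    ((PySem.List.max? ((bp.drop i).take (k + 1)) (fun y => y)).getD 0) = pvWmax bp i (k + 1) := by
  have hdrop : bp.drop i = bp[i] :: bp.drop (i + 1) := (List.getElem_cons_drop hi).symm
  rw [hdrop, List.take_succ_cons, PySem.List.max?_id_cons]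
  simp only [Option.getD_some, pvWmax, hdrop, List.take_succ_cons, List.foldl_cons]
  have : bp.getD i 0 = bp[i] := List.getD_eq_getElem bp 0 hi
  rw [this, max_self]

-- A's nested loops compute the pvG-fold over pvPairsA
theorem loopA_eq (bp pp : List Int) (mp : Int) :
    (PySem.List.pyRange 1 ((bp.length : Int) + 1) 1).foldl (fun max_power_k k =>
      (PySem.List.pyRange 0 ((bp.length : Int) - k + 1) 1).foldl (fun max_power_k i =>
        let power_k := (PySem.List.slice pp (some i) (some (i + k))).sum * k +
          ((PySem.List.max? (PySem.List.slice bp (some i) (some (i + k))) (fun y => y)).getD 0)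
        if power_k ≤ mp then max k max_power_k else max_power_k) max_power_k) 0
    = (pvPairsA bp.length).foldl (pvG (pvCond bp pp mp)) 0 := by
  rw [pvPairsA, List.foldl_flatMap, PySem.List.pyRange_one]
  have h1 : (((bp.length : Int) + 1) - 1).toNat = bp.length := by omega
  rw [h1, List.foldl_map]
  refine PySem.List.foldl_congr_mem _ _ _ _ ?_
  intro acc k' hk'
  rw [List.mem_range] at hk'
  have h2 : ((bp.length : Int) - (1 + (k' : Int)) + 1) = ((bp.length - k' : Nat) : Int) := by omega
  rw [h2, PySem.List.pyRange_zero_nat, List.foldl_map, List.foldl_map]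
  refine PySem.List.foldl_congr_mem _ _ _ _ ?_
  intro acc2 i hi
  rw [List.mem_range] at hi
  have hik : (1 : Int) + (k' : Int) = ((k' + 1 : Nat) : Int) := by push_cast; ring
  simp only [hik, PySem.List.slice_natCast_add]
  rw [pvMaxWin bp i k' (by omega)]
  simp [pvG, pvCond, pvWsum]

-- B's inner loop: running sum / running max invariant
theorem loopB_inner (bp pp : List Int) (mp : Int) (i : Nat)
    (hl : bp.length = pp.length) :
    ∀ t, t ≤ bp.length - i → ∀ c : Int,
      (List.range t).foldl (fun (st : Int × Int × Int) (d : Nat) =>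
        let s := st.1 + PySem.List.pyGetD pp ((i : Int) + (d : Int)) 0
        let m := if PySem.List.pyGetD bp ((i : Int) + (d : Int)) 0 > st.2.1 then
                   PySem.List.pyGetD bp ((i : Int) + (d : Int)) 0 else st.2.1
        let k := ((i : Int) + (d : Int)) - (i : Int) + 1
        let best' := if s * k + m ≤ mp ∧ k > st.2.2 then k else st.2.2
        (s, m, best')) (0, bp.getD i 0, c)
      = (pvWsum pp i t, pvWmax bp i t,
         (List.range t).foldl (fun best d => pvG' (pvCond bp pp mp) best (i, d + 1)) c) := by
  intro t
  induction t with
  | zero => intro _ c; simp [pvWsum, pvWmax]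
  | succ t ih =>
    intro h c
    have hbt : i + t < bp.length := by omega
    have hpt : i + t < pp.length := by omega
    have hcast : ((i : Int) + (t : Int)) = ((i + t : Nat) : Int) := by push_cast; ring
    rw [List.range_succ, List.foldl_append, List.foldl_append, ih (by omega) c]
    simp only [List.foldl_cons, List.foldl_nil, hcast, PySem.List.pyGetD_natCast]
    have hs : pvWsum pp i t + pp.getD (i + t) 0 = pvWsum pp i (t + 1) :=
      (pvWsum_succ pp i t hpt).symm
    have hm : (if bp.getD (i + t) 0 > pvWmax bp i t then bp.getD (i + t) 0 else pvWmax bp i t)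
        = pvWmax bp i (t + 1) := by
      rw [pvWmax_succ bp i t hbt]
      rcases le_or_gt (bp.getD (i + t) 0) (pvWmax bp i t) with hle | hgt
      · rw [if_neg (not_lt.mpr hle), max_eq_left hle]
      · rw [if_pos hgt, max_eq_right hgt.le]
    have hk : ((i + t : Nat) : Int) - (i : Int) + 1 = ((t + 1 : Nat) : Int) := by push_cast; ring
    simp only [hs, hm, hk, pvG', pvCond, decide_eq_true_eq]

-- B computes the pvG-fold over pvPairsB
theorem loopB_eq (bp pp : List Int) (mp : Int) (hl : bp.length = pp.length) (hn : bp.length ≠ 0) :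
    get_k_nodes_alt bp pp mp = (pvPairsB bp.length).foldl (pvG (pvCond bp pp mp)) 0 := by
  unfold get_k_nodes_alt
  rw [if_neg (by push Not; exact ⟨hn, hl⟩)]
  rw [PySem.List.pyRange_zero_nat, List.foldl_map]
  rw [pvPairsB, List.foldl_flatMap]
  refine PySem.List.foldl_congr_mem _ _ _ _ ?_
  intro best i hi
  rw [List.mem_range] at hi
  rw [List.foldl_map, PySem.List.pyRange_one]
  have hbound : (((bp.length : Nat) : Int) - (i : Int)).toNat = bp.length - i := by omega
  rw [hbound, List.foldl_map, PySem.List.pyGetD_natCast,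
    loopB_inner bp pp mp i hl (bp.length - i) (le_refl _) best]
  simp only [pvG'_eq_pvG]

-- ===== VERDICT (by name: the statement is the Claim_ definition above) =====
theorem get_k_nodes_spec : Claim_equal_get_k_nodes := by
  intro bp pp mp _
  unfold Spec_get_k_nodes
  unfold get_k_nodes
  by_cases hg : bp.length ≠ pp.length ∨ bp.length = 0 ∨ pp.length = 0
  · rw [if_pos hg]
    unfold get_k_nodes_alt
    rw [if_pos (show bp.length = 0 ∨ bp.length ≠ pp.length by omega)]
  · rw [if_neg hg]
    push Not at hg
    obtain ⟨hl, hn, -⟩ := hg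
    rw [loopB_eq bp pp mp hl hn]
    by_cases hs : bp.length = 1 ∧ pp.length = 1 ∧
        PySem.List.pyGetD bp 0 0 + PySem.List.pyGetD pp 0 0 ≤ mp
    · rw [if_pos hs]
      obtain ⟨h1, h1p, hle⟩ := hs
      obtain ⟨a, rfl⟩ := List.length_eq_one_iff.mp h1
      obtain ⟨b, rfl⟩ := List.length_eq_one_iff.mp h1p
      rw [PySem.List.pyGetD_zero_cons, PySem.List.pyGetD_zero_cons] at hle
      have hc : pvCond [a] [b] mp (0, 1) = true := by
        simp [pvCond, pvWsum, pvWmax]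
        omega
      show (1 : Int) = (pvPairsB 1).foldl (pvG (pvCond [a] [b] mp)) 0
      have hp : pvPairsB 1 = [(0, 1)] := by decide
      rw [hp]
      simp [pvG, hc]
    · rw [if_neg hs]
      refine Eq.trans ?_ (pvG_perm_eq (pvCond bp pp mp) (pvPairsA bp.length) (pvPairsB bp.length)
        (fun p => (mem_pvPairsA _ p).trans (mem_pvPairsB _ p).symm))
      exact loopA_eq bp pp mp
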